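-- pv_equiv track=rewrite | github.com/AlphaKnight1701-A/ALPFA_Resume_Editor | app.py | isolate_string_by_keyword
-- ===== SOURCE A (Python) =====
-- def isolate_string_by_keyword(text, keyword):
--
--     #
--     """
--     Scans text for a keyword and returns the complete string containing that keyword,
--     bounded by spaces before and after.
--     """
--
--     # Splits the Text into an Array of Lines
--     lines = text.split('\n')
--     for line in lines:
--         if keyword in line:
--             words = line.split()
--             for word in words:
--                 if keyword in word:
--                     return word.strip()
--     return ""
-- ===== SOURCE B (Python) =====
-- def isolate_string_by_keyword(text, keyword):
--     """
--     Scans text for a keyword and returns the complete string containing that keyword,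
--     bounded by spaces before and after.
--     """
--     # One pass over whitespace-delimited tokens of the whole text: any word
--     # containing the keyword lies in a keyword-containing line, split() keeps
--     # document order, and split() tokens need no strip().
--     for word in text.split():
--         if keyword in word:
--             return word
--     return ""
-- ===== Notes on version B (the rewrite author's own statement) =====
-- stated objective: simpler
-- what changed: Replaced the nested lines-then-words scan with membership guard by a single pass over text.split(), dropping the line loop, the 'keyword in line' test and the redundant strip().
import Mathlib
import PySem

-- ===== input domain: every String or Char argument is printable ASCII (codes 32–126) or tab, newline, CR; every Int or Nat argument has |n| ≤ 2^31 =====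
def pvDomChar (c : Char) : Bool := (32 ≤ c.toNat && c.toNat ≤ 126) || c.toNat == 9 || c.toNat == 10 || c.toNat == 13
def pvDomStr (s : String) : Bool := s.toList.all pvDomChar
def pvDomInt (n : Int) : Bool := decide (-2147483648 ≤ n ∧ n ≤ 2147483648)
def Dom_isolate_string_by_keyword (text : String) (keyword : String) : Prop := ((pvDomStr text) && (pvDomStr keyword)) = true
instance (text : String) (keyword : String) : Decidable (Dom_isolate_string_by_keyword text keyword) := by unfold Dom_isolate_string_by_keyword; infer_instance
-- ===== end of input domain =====

-- B replaces A's nested lines-then-words scan (with its 'keyword in line' guard and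
-- redundant strip()) by a single pass over text.split(); objective: simpler.

-- ===== PORT A =====
-- inner loop: 'for word in words: if keyword in word: return word.strip()'
def pvFindWordA (keyword : String) : List String → Option String
  | [] => none
  | w :: ws => if PySem.Str.isIn keyword w then some (PySem.Str.strip w) else pvFindWordA keyword ws

-- outer loop: 'for line in lines: if keyword in line: …' (falls through when the inner loop returns nothing)
def pvLinesA (keyword : String) : List String → String
  | [] => ""
  | ln :: ls =>
    if PySem.Str.isIn keyword ln then
      match pvFindWordA keyword (PySem.Str.split₀ ln) with
      | some w => w
      | none => pvLinesA keyword ls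
    else pvLinesA keyword ls

-- text.split('\n'): the separator is the fixed nonempty "\n", so this is Chars.splitOn (never raises)
def isolate_string_by_keyword (text : String) (keyword : String) : String :=
  pvLinesA keyword ((PySem.Chars.splitOn text.toList ['\n']).map String.ofList)

-- ===== PORT B =====
-- single loop: 'for word in text.split(): if keyword in word: return word'
def pvScanB (keyword : String) : List String → String
  | [] => ""
  | w :: ws => if PySem.Str.isIn keyword w then w else pvScanB keyword ws

def isolate_string_by_keyword_alt (text : String) (keyword : String) : String :=
  pvScanB keyword (PySem.Str.split₀ text)

-- ===== PRECONDITION & SPEC =====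
def Spec_isolate_string_by_keyword (text : String) (keyword : String) (out : String) : Prop := out = isolate_string_by_keyword_alt text keyword
instance (text : String) (keyword : String) (out : String) : Decidable (Spec_isolate_string_by_keyword text keyword out) := by unfold Spec_isolate_string_by_keyword; infer_instance

-- ===== CLAIM (what is proved, stated in full; the proofs are below) =====
def Claim_equal_isolate_string_by_keyword : Prop := ∀ (text : String) (keyword : String), Dom_isolate_string_by_keyword text keyword → Spec_isolate_string_by_keyword text keyword (isolate_string_by_keyword text keyword)

-- ===== LEMMAS AND PROOFS =====

-- reference tokenizer: the words str.split() produces, written structurally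
def pvWordsRef : List Char → List (List Char)
  | [] => []
  | c :: s =>
    if PySem.Chars.isspace c then pvWordsRef s
    else (c :: s.takeWhile (fun d => !PySem.Chars.isspace d)) ::
          pvWordsRef (s.dropWhile (fun d => !PySem.Chars.isspace d))
  termination_by s => s.length
  decreasing_by
  · simp
  · have := List.length_dropWhile_le (fun d => !PySem.Chars.isspace d) s
    simp; omega

-- first word containing k, else []
def pvScanC (k : List Char) : List (List Char) → List Char
  | [] => []
  | w :: ws => if PySem.Chars.isIn k w then w else pvScanC k ws

-- split₀.go characterization
theorem pvGo_eq (s cur : List Char) (acc : List (List Char)) :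
    PySem.Chars.split₀.go s cur acc =
      acc.reverse ++
        (if cur.isEmpty then pvWordsRef s
         else (cur.reverse ++ s.takeWhile (fun d => !PySem.Chars.isspace d)) ::
              pvWordsRef (s.dropWhile (fun d => !PySem.Chars.isspace d))) := by
  induction s generalizing cur acc with
  | nil =>
    by_cases h : cur.isEmpty <;>
      simp [PySem.Chars.split₀.go, h, pvWordsRef]
  | cons c rest ih =>
    by_cases hc : PySem.Chars.isspace c
    · by_cases h : cur.isEmpty
      · rw [List.isEmpty_iff] at h; subst h
        simp [PySem.Chars.split₀.go, hc, ih, pvWordsRef]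
      · simp only [PySem.Chars.split₀.go, hc, if_pos, h]
        rw [ih [] (cur.reverse :: acc)]
        simp [pvWordsRef, hc]
    · simp only [PySem.Chars.split₀.go, hc, Bool.false_eq_true, if_false]
      rw [ih (c :: cur) acc]
      by_cases h : cur.isEmpty
      · rw [List.isEmpty_iff] at h; subst h
        simp [pvWordsRef, hc]
      · simp [h, hc]

theorem pvSplit₀_eq (s : List Char) : PySem.Chars.split₀ s = pvWordsRef s := by
  simpa [PySem.Chars.split₀] using pvGo_eq s [] []

-- splitOn.go characterization: text.split('\n') = splitOnP (· == '\n')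
theorem pvSplitOnGo_eq (fuel : Nat) (l cur : List Char) (acc : List (List Char)) (h : l.length < fuel) :
    PySem.Chars.splitOn.go ['\n'] fuel l cur acc =
      acc.reverse ++ (l.splitOnP (· == '\n')).modifyHead (cur.reverse ++ ·) := by
  induction fuel generalizing l cur acc with
  | zero => omega
  | succ n ih =>
    match l with
    | [] => simp [PySem.Chars.splitOn.go, List.splitOnP_nil]
    | c :: rest =>
      by_cases hc : c = '\n'
      · subst hc
        have hpre : List.isPrefixOf ['\n'] ('\n' :: rest) = true := by
          simp [List.isPrefixOf]
        simp only [PySem.Chars.splitOn.go, hpre, if_pos, List.length_cons,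
          List.drop_succ_cons]
        simp only [List.length_nil, List.drop_zero]
        rw [ih rest [] (cur.reverse :: acc) (by simp at h; omega)]
        simp [List.splitOnP_cons]
        rcases List.splitOnP (fun x => x == '\n') rest with _ | ⟨H, T⟩ <;> simp
      · have hpre : List.isPrefixOf ['\n'] (c :: rest) = false := by
          simp [List.isPrefixOf]; exact fun e => hc e.symm
        simp only [PySem.Chars.splitOn.go, hpre, Bool.false_eq_true, if_false]
        rw [ih rest (c :: cur) acc (by simp at h ⊢; omega)]
        have hbe : (c == '\n') = false := by simp [hc]
        rcases hsp : rest.splitOnP (· == '\n') with _ | ⟨H, T⟩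
        · exact absurd hsp (List.splitOnP_ne_nil _ _)
        · simp [List.splitOnP_cons, hbe, hsp]

theorem pvSplitOn_eq (s : List Char) :
    PySem.Chars.splitOn s ['\n'] = s.splitOnP (· == '\n') := by
  rw [PySem.Chars.splitOn, pvSplitOnGo_eq _ _ _ _ (by omega)]
  rcases hsp : s.splitOnP (· == '\n') with _ | ⟨H, T⟩
  · exact absurd hsp (List.splitOnP_ne_nil _ _)
  · simp

-- every word of pvWordsRef is whitespace-free
theorem pvWords_nonspace (s : List Char) :
    ∀ w ∈ pvWordsRef s, ∀ c ∈ w, PySem.Chars.isspace c = false := by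
  induction s using pvWordsRef.induct with
  | case1 => simp [pvWordsRef]
  | case2 c s hc ih => simpa [pvWordsRef, hc] using ih
  | case3 c s hc ih =>
    intro w hw d hd
    simp only [pvWordsRef, if_neg hc, List.mem_cons] at hw
    rcases hw with hw | hw
    · subst hw
      simp only [List.mem_cons] at hd
      rcases hd with rfl | hd
      · simpa using hc
      · simpa using List.mem_takeWhile_imp hd
    · exact ih w hw d hd

-- strip is the identity on whitespace-free words
theorem pvStrip_id (w : List Char) (h : ∀ c ∈ w, PySem.Chars.isspace c = false) :
    PySem.Chars.strip w = w := by
  have hl : List.dropWhile PySem.Chars.isspace w = w :=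
    List.dropWhile_eq_self_iff.mpr (fun hne => by simp [h _ (List.getElem_mem hne)])
  have hr : List.dropWhile PySem.Chars.isspace w.reverse = w.reverse :=
    List.dropWhile_eq_self_iff.mpr (fun hne => by
      have hm : w.reverse[0] ∈ w := List.mem_reverse.mp (List.getElem_mem hne)
      simp only [h _ hm]
      simp)
  rw [PySem.Chars.strip, PySem.Chars.lstrip, PySem.Chars.rstrip, hl, hr, List.reverse_reverse]

-- every word is an infix of the text it was split from
theorem pvWords_infix (s : List Char) : ∀ w ∈ pvWordsRef s, w <:+: s := by
  induction s using pvWordsRef.induct with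
  | case1 => simp [pvWordsRef]
  | case2 c s hc ih =>
    intro w hw
    rw [pvWordsRef, if_pos hc] at hw
    exact (ih w hw).trans (List.infix_cons (List.infix_refl s))
  | case3 c s hc ih =>
    intro w hw
    simp only [pvWordsRef, if_neg hc, List.mem_cons] at hw
    rcases hw with hw | hw
    · subst hw
      exact List.IsPrefix.isInfix ⟨s.dropWhile (fun d => !PySem.Chars.isspace d), by
        simp [List.takeWhile_append_dropWhile]⟩
    · exact ((ih w hw).trans (List.dropWhile_suffix _).isInfix).trans (List.infix_cons (List.infix_refl s))

-- take/dropWhile of a word predicate only see the first line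
theorem pvFlat_aux (s : List Char) (H : List Char) (T : List (List Char))
    (hs : s.splitOnP (· == '\n') = H :: T) :
    s.takeWhile (fun d => !PySem.Chars.isspace d) = H.takeWhile (fun d => !PySem.Chars.isspace d) ∧
    (s.dropWhile (fun d => !PySem.Chars.isspace d)).splitOnP (· == '\n') =
      H.dropWhile (fun d => !PySem.Chars.isspace d) :: T := by
  induction s generalizing H T with
  | nil =>
    simp [List.splitOnP_nil] at hs
    obtain ⟨rfl, rfl⟩ := hs
    simp [List.splitOnP_nil]
  | cons c r ih =>
    by_cases hc : c = '\n'
    · subst hc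
      rw [List.splitOnP_cons] at hs
      simp only [BEq.rfl, if_pos] at hs
      obtain ⟨rfl, rfl⟩ : ([] : List Char) = H ∧ r.splitOnP (· == '\n') = T := by
        cases hs; exact ⟨rfl, rfl⟩
      have hn : PySem.Chars.isspace '\n' = true := by decide
      constructor
      · simp [hn]
      · simp [hn, List.splitOnP_cons]
    · rcases hr : r.splitOnP (· == '\n') with _ | ⟨H', T'⟩
      · exact absurd hr (List.splitOnP_ne_nil _ _)
      · have hbe : (c == '\n') = false := by simp [hc]
        rw [List.splitOnP_cons, hbe] at hs
        simp only [Bool.false_eq_true, if_false, hr, List.modifyHead_cons] at hs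
        cases hs
        obtain ⟨iht, ihd⟩ := ih H' T hr
        by_cases hp : PySem.Chars.isspace c
        · constructor
          · simp [hp]
          · simp only [List.dropWhile_cons, hp, Bool.not_true, Bool.false_eq_true, if_false]
            rw [List.splitOnP_cons, hbe]
            simp [hr]
        · constructor
          · simp [hp, iht]
          · simp only [List.dropWhile_cons, hp, Bool.not_false, if_true, ihd]

-- the words of a text are the words of its lines, in order
theorem pvWords_flat_aux (n : Nat) : ∀ s : List Char, s.length ≤ n →
    pvWordsRef s = (s.splitOnP (· == '\n')).flatMap pvWordsRef := by
  induction n with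
  | zero =>
    intro s hs
    have : s = [] := List.eq_nil_of_length_eq_zero (Nat.le_zero.mp hs)
    subst this
    simp [pvWordsRef, List.splitOnP_nil]
  | succ n ih =>
    intro s hs
    match s with
    | [] => simp [pvWordsRef, List.splitOnP_nil]
    | c :: r =>
      rcases hr : r.splitOnP (· == '\n') with _ | ⟨H, T⟩
      · exact absurd hr (List.splitOnP_ne_nil _ _)
      by_cases hc : c = '\n'
      · subst hc
        have hn : PySem.Chars.isspace '\n' = true := by decide
        rw [pvWordsRef, if_pos hn, List.splitOnP_cons]
        simp only [BEq.rfl, if_pos, List.flatMap_cons, pvWordsRef, List.nil_append]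
        exact ih r (by simpa using Nat.le_of_succ_le_succ hs)
      · have hbe : (c == '\n') = false := by simp [hc]
        rw [List.splitOnP_cons, hbe]
        simp only [Bool.false_eq_true, if_false, hr, List.modifyHead_cons, List.flatMap_cons]
        by_cases hp : PySem.Chars.isspace c
        · rw [pvWordsRef, if_pos hp, pvWordsRef, if_pos hp]
          rw [ih r (by simpa using Nat.le_of_succ_le_succ hs), hr, List.flatMap_cons]
        · obtain ⟨iht, ihd⟩ := pvFlat_aux r H T hr
          rw [pvWordsRef, if_neg hp, pvWordsRef, if_neg hp, iht]
          have hlen : (r.dropWhile (fun d => !PySem.Chars.isspace d)).length ≤ n := by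
            have := List.length_dropWhile_le (fun d => !PySem.Chars.isspace d) r
            simp at hs; omega
          rw [ih _ hlen, ihd, List.flatMap_cons, List.cons_append]

theorem pvWords_flat (s : List Char) :
    pvWordsRef s = (s.splitOnP (· == '\n')).flatMap pvWordsRef :=
  pvWords_flat_aux s.length s le_rfl

-- a scan skips a block of words none of which contains k
theorem pvScanC_skip (k : List Char) (ws rest : List (List Char))
    (h : ∀ w ∈ ws, PySem.Chars.isIn k w = false) :
    pvScanC k (ws ++ rest) = pvScanC k rest := by
  induction ws with
  | nil => simp
  | cons w ws ih =>
    rw [List.cons_append, pvScanC, h w (List.mem_cons_self), if_neg (by simp)]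
    exact ih (fun u hu => h u (List.mem_cons_of_mem _ hu))

-- inner loop of A finds nothing: the scan passes over those words
theorem pvInner_none (k : String) (ws rest : List (List Char))
    (h : pvFindWordA k (ws.map String.ofList) = none) :
    pvScanC k.toList (ws ++ rest) = pvScanC k.toList rest := by
  induction ws with
  | nil => simp
  | cons w ws ih =>
    rw [List.map_cons, pvFindWordA] at h
    by_cases hin : PySem.Str.isIn k (String.ofList w)
    · rw [if_pos hin] at h; cases h
    · rw [if_neg hin] at h
      have hc : PySem.Chars.isIn k.toList w = false := by
        have := PySem.Str.isIn_eq k (String.ofList w)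
        rw [String.toList_ofList] at this
        rw [← this]; simpa using hin
      rw [List.cons_append, pvScanC, hc, if_neg (by simp)]
      exact ih h

-- inner loop of A finds a word: the scan returns exactly that word
theorem pvInner_some (k : String) (ws rest : List (List Char)) (w : String)
    (hw : ∀ u ∈ ws, ∀ c ∈ u, PySem.Chars.isspace c = false)
    (h : pvFindWordA k (ws.map String.ofList) = some w) :
    String.ofList (pvScanC k.toList (ws ++ rest)) = w := by
  induction ws with
  | nil => cases h
  | cons u ws ih =>
    rw [List.map_cons, pvFindWordA] at h
    by_cases hin : PySem.Str.isIn k (String.ofList u)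
    · rw [if_pos hin] at h
      have hc : PySem.Chars.isIn k.toList u = true := by
        have := PySem.Str.isIn_eq k (String.ofList u)
        rw [String.toList_ofList] at this
        rw [← this]; simpa using hin
      rw [List.cons_append, pvScanC, hc, if_pos rfl]
      have : PySem.Str.strip (String.ofList u) = String.ofList u := by
        rw [PySem.Str.strip]
        rw [String.toList_ofList]
        rw [pvStrip_id u (hw u (List.mem_cons_self))]
      rw [this] at h
      exact Option.some.inj h
    · rw [if_neg hin] at h
      have hc : PySem.Chars.isIn k.toList u = false := by
        have := PySem.Str.isIn_eq k (String.ofList u)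
        rw [String.toList_ofList] at this
        rw [← this]; simpa using hin
      rw [List.cons_append, pvScanC, hc, if_neg (by simp)]
      exact ih (fun v hv => hw v (List.mem_cons_of_mem _ hv)) h

-- Str.split₀ of a rebuilt line is pvWordsRef's words
theorem pvSplit₀_ofList (ln : List Char) :
    PySem.Str.split₀ (String.ofList ln) = (pvWordsRef ln).map String.ofList := by
  rw [PySem.Str.split₀, String.toList_ofList, pvSplit₀_eq]

-- outer loop of A vs single scan over the flattened words
theorem pvMain (k : String) (lines : List (List Char)) :
    pvLinesA k (lines.map String.ofList) =
      String.ofList (pvScanC k.toList (lines.flatMap pvWordsRef)) := by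
  induction lines with
  | nil => simp [pvLinesA, pvScanC]
  | cons ln ls ih =>
    rw [List.map_cons, pvLinesA, List.flatMap_cons]
    by_cases hin : PySem.Str.isIn k (String.ofList ln)
    · rw [if_pos hin, pvSplit₀_ofList]
      rcases hfw : pvFindWordA k ((pvWordsRef ln).map String.ofList) with _ | w
      · rw [pvInner_none k _ _ hfw]
        exact ih
      · exact (pvInner_some k _ _ w (pvWords_nonspace ln) hfw).symm
    · rw [if_neg hin]
      have hln : PySem.Chars.isIn k.toList ln = false := by
        have := PySem.Str.isIn_eq k (String.ofList ln)
        rw [String.toList_ofList] at this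
        rw [← this]; simpa using hin
      rw [pvScanC_skip k.toList _ _ (fun w hwmem => by
        rw [PySem.Chars.isIn_eq_false_iff] at hln ⊢
        exact fun hinf => hln (hinf.trans (pvWords_infix ln w hwmem)))]
      exact ih

-- B's loop vs the char-level scan
theorem pvScanB_eq (k : String) (ws : List (List Char)) :
    pvScanB k (ws.map String.ofList) = String.ofList (pvScanC k.toList ws) := by
  induction ws with
  | nil => simp [pvScanB, pvScanC]
  | cons w ws ih =>
    rw [List.map_cons, pvScanB, pvScanC]
    have he : PySem.Str.isIn k (String.ofList w) = PySem.Chars.isIn k.toList w := by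
      rw [PySem.Str.isIn_eq, String.toList_ofList]
    by_cases hin : PySem.Chars.isIn k.toList w
    · rw [he, hin]; simp
    · rw [he]
      simp only [hin, Bool.false_eq_true, if_false]
      exact ih

-- ===== VERDICT (by name: the statement is the Claim_ definition above) =====
theorem isolate_string_by_keyword_spec : Claim_equal_isolate_string_by_keyword := by
  intro text keyword _
  show isolate_string_by_keyword text keyword = isolate_string_by_keyword_alt text keyword
  rw [isolate_string_by_keyword, pvSplitOn_eq, pvMain, ← pvWords_flat,
      isolate_string_by_keyword_alt]
  rw [show PySem.Str.split₀ text = (pvWordsRef text.toList).map String.ofList by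
        rw [PySem.Str.split₀, pvSplit₀_eq]]
  rw [pvScanB_eq]
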